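-- pv_equiv track=rewrite | github.com/simeydk/adventofcode | 2021/day22.py | biggest_ranges
-- ===== SOURCE A (Python) =====
-- def biggest_ranges(instructions):
--     min_x = min(x_range[0] for on, x_range, y_range, z_range in instructions)
--     max_x = max(x_range[1] for on, x_range, y_range, z_range in instructions)
--     min_y = min(y_range[0] for on, x_range, y_range, z_range in instructions)
--     max_y = max(y_range[1] for on, x_range, y_range, z_range in instructions)
--     min_z = min(z_range[0] for on, x_range, y_range, z_range in instructions)
--     max_z = max(z_range[1] for on, x_range, y_range, z_range in instructions)
--     return (min_x, max_x), (min_y, max_y), (min_z, max_z)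
-- ===== SOURCE B (Python) =====
-- def biggest_ranges(instructions):
--     _, (min_x, max_x), (min_y, max_y), (min_z, max_z) = instructions[0]
--     for _, (x0, x1), (y0, y1), (z0, z1) in instructions[1:]:
--         min_x = min(min_x, x0)
--         max_x = max(max_x, x1)
--         min_y = min(min_y, y0)
--         max_y = max(max_y, y1)
--         min_z = min(min_z, z0)
--         max_z = max(max_z, z1)
--     return (min_x, max_x), (min_y, max_y), (min_z, max_z)
-- ===== Notes on version B (the rewrite author's own statement) =====
-- stated objective: simpler
-- what changed: A makes six separate min()/max() passes over the instruction list; B makes a single pass maintaining six running accumulators seeded from the first instruction.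
-- outside the precondition, e.g. on biggest_ranges([]): A raises ValueError, B raises IndexError
import Mathlib
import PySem

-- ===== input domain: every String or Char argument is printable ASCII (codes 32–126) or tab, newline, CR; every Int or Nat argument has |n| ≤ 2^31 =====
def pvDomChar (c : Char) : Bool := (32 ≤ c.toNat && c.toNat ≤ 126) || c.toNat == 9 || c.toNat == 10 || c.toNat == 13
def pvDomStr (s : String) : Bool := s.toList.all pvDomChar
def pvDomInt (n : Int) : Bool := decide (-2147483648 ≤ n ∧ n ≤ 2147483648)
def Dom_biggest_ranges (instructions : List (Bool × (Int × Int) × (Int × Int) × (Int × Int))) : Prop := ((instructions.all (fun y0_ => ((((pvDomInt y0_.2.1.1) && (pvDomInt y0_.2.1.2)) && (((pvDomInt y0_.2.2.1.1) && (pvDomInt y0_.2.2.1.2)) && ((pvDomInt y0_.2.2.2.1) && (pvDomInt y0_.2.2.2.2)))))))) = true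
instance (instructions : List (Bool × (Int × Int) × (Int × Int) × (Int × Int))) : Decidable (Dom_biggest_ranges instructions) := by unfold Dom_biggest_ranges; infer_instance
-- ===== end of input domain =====

-- B replaces A's six min()/max() passes by one pass with six running accumulators (objective: simpler).


-- ===== PORT A =====
-- six independent min/max passes, each over the whole list; .getD 0 is unreachable under Pre_ (nonempty)
def biggest_ranges (instructions : List (Bool × (Int × Int) × (Int × Int) × (Int × Int))) : (Int × Int) × (Int × Int) × (Int × Int) :=
  let min_x := (PySem.List.min? (instructions.map (fun i => i.2.1.1)) (fun v => v)).getD 0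
  let max_x := (PySem.List.max? (instructions.map (fun i => i.2.1.2)) (fun v => v)).getD 0
  let min_y := (PySem.List.min? (instructions.map (fun i => i.2.2.1.1)) (fun v => v)).getD 0
  let max_y := (PySem.List.max? (instructions.map (fun i => i.2.2.1.2)) (fun v => v)).getD 0
  let min_z := (PySem.List.min? (instructions.map (fun i => i.2.2.2.1)) (fun v => v)).getD 0
  let max_z := (PySem.List.max? (instructions.map (fun i => i.2.2.2.2)) (fun v => v)).getD 0
  ((min_x, max_x), (min_y, max_y), (min_z, max_z))

-- ===== PORT B =====
-- single pass: seed the six accumulators from the first instruction, fold the rest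
def bralt_step (acc : (Int × Int) × (Int × Int) × (Int × Int))
    (ins : Bool × (Int × Int) × (Int × Int) × (Int × Int)) : (Int × Int) × (Int × Int) × (Int × Int) :=
  let ((min_x, max_x), (min_y, max_y), (min_z, max_z)) := acc
  let (_, (x0, x1), (y0, y1), (z0, z1)) := ins
  ((min min_x x0, max max_x x1), (min min_y y0, max max_y y1), (min min_z z0, max max_z z1))

def biggest_ranges_alt (instructions : List (Bool × (Int × Int) × (Int × Int) × (Int × Int))) : (Int × Int) × (Int × Int) × (Int × Int) :=
  match instructions with
  | [] => ((0, 0), (0, 0), (0, 0))  -- unreachable under Pre_; the Python B raises here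
  | (_, (x0, x1), (y0, y1), (z0, z1)) :: rest =>
      rest.foldl bralt_step ((x0, x1), (y0, y1), (z0, z1))

-- ===== PRECONDITION & SPEC =====
-- Pre_ excludes the empty list, on which A's min() raises ValueError (and B's indexing raises IndexError).
def Pre_biggest_ranges (instructions : List (Bool × (Int × Int) × (Int × Int) × (Int × Int))) : Prop := instructions ≠ []
instance (instructions : List (Bool × (Int × Int) × (Int × Int) × (Int × Int))) : Decidable (Pre_biggest_ranges instructions) := by unfold Pre_biggest_ranges; infer_instance
def pvWitness_biggest_ranges : (List (Bool × (Int × Int) × (Int × Int) × (Int × Int))) := [(true, (1, 2), (3, 4), (5, 6))]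
def Spec_biggest_ranges (instructions : List (Bool × (Int × Int) × (Int × Int) × (Int × Int))) (out : (Int × Int) × (Int × Int) × (Int × Int)) : Prop := out = biggest_ranges_alt instructions
instance (instructions : List (Bool × (Int × Int) × (Int × Int) × (Int × Int))) (out : (Int × Int) × (Int × Int) × (Int × Int)) : Decidable (Spec_biggest_ranges instructions out) := by unfold Spec_biggest_ranges; infer_instance

-- ===== CLAIM =====
def Claim_equal_biggest_ranges : Prop := ∀ (instructions : List (Bool × (Int × Int) × (Int × Int) × (Int × Int))), Dom_biggest_ranges instructions → Pre_biggest_ranges instructions → Spec_biggest_ranges instructions (biggest_ranges instructions)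

-- ===== LEMMAS AND PROOFS =====
-- B's single fold computes the six componentwise running folds.
theorem bralt_foldl_eq (t : List (Bool × (Int × Int) × (Int × Int) × (Int × Int)))
    (a b c d e f : Int) :
    t.foldl bralt_step ((a, b), (c, d), (e, f)) =
      ((t.foldl (fun m i => min m i.2.1.1) a, t.foldl (fun m i => max m i.2.1.2) b),
       (t.foldl (fun m i => min m i.2.2.1.1) c, t.foldl (fun m i => max m i.2.2.1.2) d),
       (t.foldl (fun m i => min m i.2.2.2.1) e, t.foldl (fun m i => max m i.2.2.2.2) f)) := by
  induction t generalizing a b c d e f with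
  | nil => rfl
  | cons h t ih => simp [List.foldl_cons, bralt_step, ih]

-- ===== VERDICT =====
theorem biggest_ranges_spec : Claim_equal_biggest_ranges := by
  intro instructions _ hpre
  unfold Spec_biggest_ranges
  match instructions with
  | [] => exact absurd rfl hpre
  | (on, (x0, x1), (y0, y1), (z0, z1)) :: rest =>
      simp [biggest_ranges, biggest_ranges_alt, PySem.List.min?_id_cons, PySem.List.max?_id_cons,
        List.foldl_map, bralt_foldl_eq]
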